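-- pv_equiv track=rewrite | github.com/halfow/aoc | src/2025/2025-04.py | part2
-- ===== SOURCE A (Python) =====
-- from collections import Counter
-- from collections.abc import Generator
-- from itertools import product
--
-- class Grid(list):
--     def __init__(self, raw: str):
--         super().__init__(list(line) for line in raw.split("\n"))
--
--     def __iter__(self) -> Generator[tuple[tuple[int, int], str]]:
--         for x, y in product(
--             range(len(self[0])),
--             range(len(self)),
--         ):
--             yield (x, y), self[y][x]
--
--     def kernel(self, x: int, y: int, k: int):
--         for a, b in product(
--             range(max(x - k, 0), min(x + k + 1, len(self[0]))),
--             range(max(y - k, 0), min(y + k + 1, len(self))),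
--         ):
--             yield self[b][a]
--
-- def part2(raw: str):
--     grid, result = Grid(raw), 0
--     while True:
--         rm = []
--         for pos, char in grid:
--             if (char == "@") and (Counter(grid.kernel(*pos, 1))["@"] < 5):
--                 result += 1
--                 rm.append(pos)
--
--         if not rm:
--             break
--
--         while rm:
--             x, y = rm.pop()
--             grid[y][x] = "."
--
--     return result
-- ===== SOURCE B (Python) =====
-- def part2(raw: str):
--     rows = raw.split("\n")
--     h = len(rows)
--     w = len(rows[0])
--     live = {(x, y) for y in range(h) for x in range(w) if rows[y][x] == "@"}
--
--     def neighbours(x, y):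
--         for dx in (-1, 0, 1):
--             for dy in (-1, 0, 1):
--                 if (dx, dy) != (0, 0):
--                     nx, ny = x + dx, y + dy
--                     if 0 <= nx < w and 0 <= ny < h:
--                         yield nx, ny
--
--     # one-shot neighbour counts, then worklist peeling: each cell is
--     # enqueued at most once, when its count first drops below 4
--     deg = {c: sum(n in live for n in neighbours(*c)) for c in live}
--     stack = [c for c in live if deg[c] < 4]
--     removed = set(stack)
--     result = 0
--     while stack:
--         x, y = stack.pop()
--         result += 1
--         for n in neighbours(x, y):
--             if n in live and n not in removed:
--                 deg[n] -= 1
--                 if deg[n] < 4: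
--                     removed.add(n)
--                     stack.append(n)
--     return result
-- ===== Notes on version B (the rewrite author's own statement) =====
-- stated objective: faster
-- what changed: B replaces A's repeated full-grid fixed-point sweeps by one-shot neighbour counts plus a worklist (stack) that pops each doomed cell once and decrements its neighbours' counts, enqueueing a cell exactly when its count first drops below the threshold; correctness rests on order-independence of monotone threshold peeling (k-core uniqueness), proved in the Lean file.
import Mathlib
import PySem

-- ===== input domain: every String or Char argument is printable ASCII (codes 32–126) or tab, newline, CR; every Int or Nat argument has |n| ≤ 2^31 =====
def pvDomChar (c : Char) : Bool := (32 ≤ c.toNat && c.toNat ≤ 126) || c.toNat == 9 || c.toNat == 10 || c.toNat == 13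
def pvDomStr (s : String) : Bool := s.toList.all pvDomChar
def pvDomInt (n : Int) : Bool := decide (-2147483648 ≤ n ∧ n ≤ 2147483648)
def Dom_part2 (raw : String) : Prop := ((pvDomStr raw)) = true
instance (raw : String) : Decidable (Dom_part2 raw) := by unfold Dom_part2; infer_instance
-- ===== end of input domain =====

-- B replaces A's repeated full-grid sweeps by one-shot neighbour counts plus a worklist
-- that pops each doomed cell once and decrements its neighbours' counts (objective: faster).

-- ===== PORT A =====
-- raw.split("\n") as lists of chars (Grid.__init__)
def pvLines (raw : String) : List (List Char) :=
  PySem.Chars.splitOn raw.toList ['\n']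

-- self[y][x]; rows/cells out of range yield ' ' (Python raises IndexError there: excluded by Pre_)
def pvCell (g : List (List Char)) (x y : Nat) : Char :=
  (g.getD y []).getD x ' '

-- the (a, b) index pairs of the clipped 3x3 window, column-major (product order)
def pvWpos (g : List (List Char)) (x y : Nat) : List (Nat × Nat) :=
  (List.range' (x - 1) (min (x + 2) (g.headD []).length - (x - 1))).flatMap fun a =>
    (List.range' (y - 1) (min (y + 2) g.length - (y - 1))).map fun b => (a, b)

-- grid.kernel(x, y, 1): the chars of the clipped 3x3 window
def pvKernel (g : List (List Char)) (x y : Nat) : List Char :=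
  (pvWpos g x y).map fun q => pvCell g q.1 q.2

-- Grid.__iter__ position order: product(range(len(self[0])), range(len(self)))
def pvPositions (g : List (List Char)) : List (Nat × Nat) :=
  (List.range (g.headD []).length).flatMap fun x =>
    (List.range g.length).map fun y => (x, y)

-- one sweep of A's for-loop: accumulates result and rm
def pvScanA (g : List (List Char)) (result : Int) : Int × List (Nat × Nat) :=
  (pvPositions g).foldl
    (fun acc p =>
      if pvCell g p.1 p.2 == '@' &&
          decide ((PySem.Dict.counter (pvKernel g p.1 p.2)).getD '@' 0 < 5)
      then (acc.1 + 1, acc.2 ++ [p]) else acc)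
    (result, [])

-- grid[y][x] = "."
def pvSet (g : List (List Char)) (x y : Nat) (c : Char) : List (List Char) :=
  g.set y ((g.getD y []).set x c)

-- number of '@' cells: the termination measure of A's while-loop
def pvAt (g : List (List Char)) : Nat := (g.map fun r => r.count '@').sum

theorem count_set_dot_le (r : List Char) (x : Nat) :
    (r.set x '.').count '@' ≤ r.count '@' := by
  induction r generalizing x with
  | nil => simp
  | cons c t ih =>
    cases x with
    | zero =>
      simp only [List.set_cons_zero, List.count_cons]
      split <;> split <;> simp_all
    | succ x => simpa [List.count_cons] using ih x

theorem count_set_dot_lt (r : List Char) (x : Nat) (h : r.getD x ' ' = '@') :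
    (r.set x '.').count '@' < r.count '@' := by
  induction r generalizing x with
  | nil => simp at h
  | cons c t ih =>
    cases x with
    | zero =>
      have hc : c = '@' := by simpa using h
      subst hc
      simp
    | succ x =>
      have := ih x (by simpa using h)
      simpa [List.count_cons] using this

theorem pvAt_pvSet_le (g : List (List Char)) (x y : Nat) :
    pvAt (pvSet g x y '.') ≤ pvAt g := by
  induction g generalizing y with
  | nil => simp [pvSet, pvAt]
  | cons r t ih =>
    cases y with
    | zero => simpa [pvSet, pvAt] using count_set_dot_le r x
    | succ y => simpa [pvSet, pvAt] using ih y

theorem pvAt_pvSet_lt (g : List (List Char)) (x y : Nat) (h : pvCell g x y = '@') :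
    pvAt (pvSet g x y '.') < pvAt g := by
  induction g generalizing y with
  | nil => simp [pvCell] at h
  | cons r t ih =>
    cases y with
    | zero => simpa [pvSet, pvAt] using count_set_dot_lt r x (by simpa [pvCell] using h)
    | succ y => simpa [pvSet, pvAt] using ih y (by simpa [pvCell] using h)

theorem pvAt_foldl_le (l : List (Nat × Nat)) (g : List (List Char)) :
    pvAt (l.foldl (fun g' p => pvSet g' p.1 p.2 '.') g) ≤ pvAt g := by
  induction l generalizing g with
  | nil => simp
  | cons p t ih => exact le_trans (ih _) (pvAt_pvSet_le g p.1 p.2)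

theorem pvScanA_eq (g : List (List Char)) (result : Int) :
    pvScanA g result =
      (result + ((pvPositions g).countP fun p =>
          pvCell g p.1 p.2 == '@' &&
            decide ((PySem.Dict.counter (pvKernel g p.1 p.2)).getD '@' 0 < 5) : Int),
        (pvPositions g).filter fun p =>
          pvCell g p.1 p.2 == '@' &&
            decide ((PySem.Dict.counter (pvKernel g p.1 p.2)).getD '@' 0 < 5)) := by
  unfold pvScanA
  rw [show (fun (acc : Int × List (Nat × Nat)) (p : Nat × Nat) =>
      if pvCell g p.1 p.2 == '@' &&
          decide ((PySem.Dict.counter (pvKernel g p.1 p.2)).getD '@' 0 < 5)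
      then (acc.1 + 1, acc.2 ++ [p]) else acc) =
    (fun acc p =>
      ((if pvCell g p.1 p.2 == '@' &&
          decide ((PySem.Dict.counter (pvKernel g p.1 p.2)).getD '@' 0 < 5)
        then acc.1 + 1 else acc.1),
       (if pvCell g p.1 p.2 == '@' &&
          decide ((PySem.Dict.counter (pvKernel g p.1 p.2)).getD '@' 0 < 5)
        then acc.2 ++ [p] else acc.2))) from by
      funext acc p; split <;> rfl]
  rw [PySem.List.foldl_prod_mk
    (f := fun (a : Int) (p : Nat × Nat) =>
      if pvCell g p.1 p.2 == '@' &&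
          decide ((PySem.Dict.counter (pvKernel g p.1 p.2)).getD '@' 0 < 5)
      then a + 1 else a)
    (g := fun (l : List (Nat × Nat)) (p : Nat × Nat) =>
      if pvCell g p.1 p.2 == '@' &&
          decide ((PySem.Dict.counter (pvKernel g p.1 p.2)).getD '@' 0 < 5)
      then l ++ [p] else l)]
  rw [PySem.List.foldl_if_add_one, PySem.List.foldl_append_if_eq_filter]
  simp

theorem pvAt_erase_lt (g : List (List Char)) (rm : List (Nat × Nat))
    (hne : rm ≠ []) (hat : ∀ p ∈ rm, pvCell g p.1 p.2 = '@') :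
    pvAt (rm.reverse.foldl (fun g' p => pvSet g' p.1 p.2 '.') g) < pvAt g := by
  obtain ⟨q, t, hq⟩ := List.exists_cons_of_ne_nil (by simpa using hne :
    rm.reverse ≠ [])
  rw [hq, List.foldl_cons]
  calc pvAt (t.foldl (fun g' p => pvSet g' p.1 p.2 '.') (pvSet g q.1 q.2 '.'))
      ≤ pvAt (pvSet g q.1 q.2 '.') := pvAt_foldl_le t _
    _ < pvAt g := pvAt_pvSet_lt g q.1 q.2 (hat q (by
        have : q ∈ rm.reverse := by rw [hq]; exact List.mem_cons_self
        simpa using this))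

-- the while True loop of part2
def part2go (g : List (List Char)) (result : Int) : Int :=
  if hrm : (pvScanA g result).2 = [] then (pvScanA g result).1
  else part2go ((pvScanA g result).2.reverse.foldl (fun g' p => pvSet g' p.1 p.2 '.') g)
    (pvScanA g result).1
termination_by pvAt g
decreasing_by
  apply pvAt_erase_lt g _ hrm
  intro p hp
  have h2 : p ∈ pvPositions g ∧ pvCell g p.1 p.2 = '@' ∧
      List.count '@' (pvKernel g p.1 p.2) < 5 := by simpa [pvScanA_eq] using hp
  exact h2.2.1

def part2 (raw : String) : Int :=
  part2go (pvLines raw) 0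

-- ===== PORT B =====
-- the (at most 8) in-rectangle neighbours of (x, y), in Source B's dx/dy generator order
def pvNbrs (w h : Nat) (x y : Nat) : List (Nat × Nat) :=
  ([-1, 0, 1] : List Int).flatMap fun dx =>
    ([-1, 0, 1] : List Int).filterMap fun dy =>
      if dx = 0 ∧ dy = 0 then none
      else
        if 0 ≤ (x : Int) + dx ∧ (x : Int) + dx < (w : Int) ∧
            0 ≤ (y : Int) + dy ∧ (y : Int) + dy < (h : Int)
        then some (((x : Int) + dx).toNat, ((y : Int) + dy).toNat) else none

-- {(x, y) for y in range(h) for x in range(w) if rows[y][x] == "@"}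
def pvLiveInit (rows : List (List Char)) (w h : Nat) : PySem.Set (Nat × Nat) :=
  PySem.Set.ofList ((List.range h).flatMap fun y =>
    (List.range w).filterMap fun x => if pvCell rows x y == '@' then some (x, y) else none)

-- deg = {c: sum(n in live for n in neighbours(*c)) for c in live}
def pvDegInit (w h : Nat) (live : List (Nat × Nat)) : PySem.Dict (Nat × Nat) Int :=
  live.foldl
    (fun d c => d.insert c ((pvNbrs w h c.1 c.2).countP (fun n => live.contains n) : Int))
    PySem.Dict.empty

-- the body of Source B's inner 'for n in neighbours(x, y)' loop on state (deg, removed, stack);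
-- deg[n] -= 1 is Dict.modify (exact here: deg has a key for every live cell and n is checked live)
def pvStepF (live : List (Nat × Nat))
    (st : PySem.Dict (Nat × Nat) Int × PySem.Set (Nat × Nat) × List (Nat × Nat))
    (n : Nat × Nat) :
    PySem.Dict (Nat × Nat) Int × PySem.Set (Nat × Nat) × List (Nat × Nat) :=
  if live.contains n && !(PySem.Set.contains st.2.1 n) then
    let d' := st.1.modify n 0 (· - 1)
    if d'.getD n 0 < 4 then (d', PySem.Set.add st.2.1 n, n :: st.2.2)
    else (d', st.2.1, st.2.2)
  else st

theorem pvSetContains_eq {a : Type} [BEq a] [LawfulBEq a] (s : PySem.Set a) (x : a) :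
    PySem.Set.contains s x = decide (x ∈ s) := by
  rw [Bool.eq_iff_iff, PySem.Set.contains_iff]
  simp

theorem pvStepF_meas (live : List (Nat × Nat))
    (st : PySem.Dict (Nat × Nat) Int × PySem.Set (Nat × Nat) × List (Nat × Nat))
    (n : Nat × Nat) :
    (pvStepF live st n).2.2.length +
      2 * (live.filter (fun p => !(PySem.Set.contains (pvStepF live st n).2.1 p))).length ≤
    st.2.2.length + 2 * (live.filter (fun p => !(PySem.Set.contains st.2.1 p))).length := by
  by_cases hg : (live.contains n && !(PySem.Set.contains st.2.1 n)) = true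
  · have hn_live : n ∈ live := List.contains_iff_mem.mp ((Bool.and_eq_true _ _).mp hg).1
    have hn_r : n ∉ st.2.1 := by
      have h2 := ((Bool.and_eq_true _ _).mp hg).2
      rw [Bool.not_eq_true', pvSetContains_eq] at h2
      simpa using h2
    have hcong : ∀ p, (!(PySem.Set.contains (PySem.Set.add st.2.1 n) p)) =
        (!(p == n) && !(PySem.Set.contains st.2.1 p)) := by
      intro p
      rw [pvSetContains_eq, pvSetContains_eq]
      by_cases hpn : p = n <;> by_cases hps : p ∈ st.2.1 <;>
        simp [hpn, hps, PySem.Set.mem_add]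
    have hfe : live.filter (fun p => !(PySem.Set.contains (PySem.Set.add st.2.1 n) p)) =
        (live.filter (fun p => !(PySem.Set.contains st.2.1 p))).filter (fun p => !(p == n)) := by
      rw [List.filter_filter]
      exact List.filter_congr (fun p _ => hcong p)
    have hlt2 : ((live.filter (fun p => !(PySem.Set.contains st.2.1 p))).filter
          (fun p => !(p == n))).length <
        (live.filter (fun p => !(PySem.Set.contains st.2.1 p))).length := by
      apply List.length_filter_lt_length_iff_exists.mpr
      refine ⟨n, List.mem_filter.mpr ⟨hn_live, ?_⟩, by simp⟩
      rw [pvSetContains_eq]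
      simpa using hn_r
    by_cases hlt : (st.1.modify n 0 (· - 1)).getD n 0 < 4
    · have hstep : pvStepF live st n =
          (st.1.modify n 0 (· - 1), PySem.Set.add st.2.1 n, n :: st.2.2) := by
        unfold pvStepF
        rw [if_pos hg, if_pos hlt]
      rw [hstep]
      simp only [List.length_cons]
      rw [hfe]
      omega
    · have hstep : pvStepF live st n =
          (st.1.modify n 0 (· - 1), st.2.1, st.2.2) := by
        unfold pvStepF
        rw [if_pos hg, if_neg hlt]
      rw [hstep]
  · have hstep : pvStepF live st n = st := by
      unfold pvStepF
      rw [if_neg hg]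
    rw [hstep]

theorem pvFold_meas (live : List (Nat × Nat)) (L : List (Nat × Nat))
    (st : PySem.Dict (Nat × Nat) Int × PySem.Set (Nat × Nat) × List (Nat × Nat)) :
    (L.foldl (pvStepF live) st).2.2.length +
      2 * (live.filter (fun p => !(PySem.Set.contains (L.foldl (pvStepF live) st).2.1 p))).length ≤
    st.2.2.length + 2 * (live.filter (fun p => !(PySem.Set.contains st.2.1 p))).length := by
  induction L generalizing st with
  | nil => simp
  | cons n L ih =>
    rw [List.foldl_cons]
    exact le_trans (ih _) (pvStepF_meas live st n)

-- Source B's 'while stack' loop; Python's list used as a LIFO stack (append/pop at the right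
-- end) is modelled with the most-recent element at the head: same pop order
def pvGo (w h : Nat) (live : List (Nat × Nat)) (d : PySem.Dict (Nat × Nat) Int)
    (r : PySem.Set (Nat × Nat)) (s : List (Nat × Nat)) (res : Int) : Int :=
  match s with
  | [] => res
  | c :: rest =>
    let st := (pvNbrs w h c.1 c.2).foldl (pvStepF live) (d, r, rest)
    pvGo w h live st.1 st.2.1 st.2.2 (res + 1)
termination_by s.length + 2 * (live.filter (fun p => !(PySem.Set.contains r p))).length
decreasing_by
  have h1 := pvFold_meas live (pvNbrs w h c.1 c.2) (d, r, rest)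
  dsimp only at h1
  simp only [List.length_cons]
  omega

def part2_alt (raw : String) : Int :=
  let rows := pvLines raw
  let h := rows.length
  let w := (rows.headD []).length
  let live := pvLiveInit rows w h
  let deg := pvDegInit w h live
  let stack := live.filter (fun c => decide (deg.getD c 0 < 4))
  pvGo w h live deg (PySem.Set.ofList stack) stack 0

-- ===== PRECONDITION & SPEC =====
-- Pre_ excludes exactly the ragged inputs (a line shorter than the first line) on which the
-- Python A raises IndexError while indexing the width-of-first-line rectangle.
def Pre_part2 (raw : String) : Prop :=
  ∀ l ∈ PySem.Chars.splitOn raw.toList ['\n'],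
    ((PySem.Chars.splitOn raw.toList ['\n']).headD []).length ≤ l.length
instance (raw : String) : Decidable (Pre_part2 raw) := by unfold Pre_part2; infer_instance

def pvWitness_part2 : String := "@@.\n@@@"

def Spec_part2 (raw : String) (out : Int) : Prop := out = part2_alt raw
instance (raw : String) (out : Int) : Decidable (Spec_part2 raw out) := by
  unfold Spec_part2; infer_instance

-- ===== CLAIM (what is proved, stated in full; the proofs are below) =====
def Claim_equal_part2 : Prop := ∀ (raw : String), Dom_part2 raw → Pre_part2 raw → Spec_part2 raw (part2 raw)

-- ===== LEMMAS AND PROOFS =====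

-- ---- the round-based peeling process (proof-side intermediate between A and B) ----

-- cnt-style neighbour counts: how many live cells have c as a neighbour
def pvCnt (w h : Nat) (live : List (Nat × Nat)) : PySem.Dict (Nat × Nat) Int :=
  live.foldl
    (fun d p => (pvNbrs w h p.1 p.2).foldl (fun d' q => d'.modify q 0 (· + 1)) d)
    PySem.Dict.empty

-- the cells a round removes
def pvRmB (w h : Nat) (live : PySem.Set (Nat × Nat)) : PySem.Set (Nat × Nat) :=
  live.filter fun c => decide ((pvCnt w h live).getD c 0 < 4)

theorem pvRmB_len_lt (w h : Nat) (live : PySem.Set (Nat × Nat)) (hrm : pvRmB w h live ≠ []) :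
    (PySem.Set.diff live (pvRmB w h live)).length < live.length := by
  rcases List.exists_mem_of_ne_nil _ hrm with ⟨c, hc⟩
  have hcl : c ∈ live := (List.mem_filter.mp hc).1
  exact List.length_filter_lt_length_iff_exists.mpr ⟨c, hcl, by simp [hc]⟩

-- rounds of simultaneous removal over the live set
def pvRounds (w h : Nat) (live : PySem.Set (Nat × Nat)) (result : Int) : Int :=
  if hrm : pvRmB w h live = [] then result
  else pvRounds w h (PySem.Set.diff live (pvRmB w h live)) (result + (pvRmB w h live).length)
termination_by live.length
decreasing_by
  exact pvRmB_len_lt w h live hrm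

-- ---- A = rounds ----

theorem countP_eq_countP_of_nodup {α : Type} (l₁ l₂ : List α) (P Q : α → Bool)
    (h₁ : l₁.Nodup) (h₂ : l₂.Nodup)
    (h : ∀ q, (q ∈ l₁ ∧ P q = true) ↔ (q ∈ l₂ ∧ Q q = true)) :
    l₁.countP P = l₂.countP Q := by
  rw [List.countP_eq_length_filter, List.countP_eq_length_filter]
  refine List.Perm.length_eq ?_
  refine (List.perm_ext_iff_of_nodup (h₁.filter _) (h₂.filter _)).mpr ?_
  intro q
  simp only [List.mem_filter]
  exact h q

theorem cell_at_valid (g : List (List Char)) (x y : Nat) (h : pvCell g x y = '@') :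
    y < g.length ∧ x < (g.getD y []).length := by
  constructor
  · by_contra hy
    have hrow : g.getD y [] = [] := List.getD_eq_default _ _ (by omega)
    rw [pvCell, hrow] at h
    simp at h
  · by_contra hx
    have hd : (g.getD y []).getD x ' ' = ' ' := List.getD_eq_default _ _ (by omega)
    rw [pvCell, hd] at h
    simp at h

theorem getD_set_char (r : List Char) (x a : Nat) (c : Char) :
    (r.set x c).getD a ' ' = if a = x ∧ x < r.length then c else r.getD a ' ' := by
  simp only [List.getD_eq_getElem?_getD, List.getElem?_set]
  by_cases hax : x = a
  · subst hax
    by_cases hxl : x < r.length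
    · simp [hxl]
    · have hnone : r[x]? = none := by rw [List.getElem?_eq_none_iff]; omega
      simp [hxl, hnone]
  · simp [hax]
    intro h
    exact absurd h.symm hax

theorem getD_grid_set (g : List (List Char)) (y : Nat) (r : List Char) (b : Nat) :
    (g.set y r).getD b [] = if b = y ∧ y < g.length then r else g.getD b [] := by
  simp only [List.getD_eq_getElem?_getD, List.getElem?_set]
  by_cases hby : y = b
  · subst hby
    by_cases hl : y < g.length
    · simp [hl]
    · have hnone : g[y]? = none := by rw [List.getElem?_eq_none_iff]; omega
      simp [hl, hnone]
  · simp [hby]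
    intro h
    exact absurd h.symm hby

theorem pvCell_pvSet (g : List (List Char)) (x y : Nat) (c : Char) (a b : Nat) :
    pvCell (pvSet g x y c) a b =
      if b = y ∧ a = x ∧ y < g.length ∧ x < (g.getD y []).length then c
      else pvCell g a b := by
  show ((pvSet g x y c).getD b []).getD a ' ' = _
  rw [pvSet, getD_grid_set]
  by_cases hb : b = y ∧ y < g.length
  · rw [if_pos hb, getD_set_char]
    by_cases ha : a = x ∧ x < (g.getD y []).length
    · rw [if_pos ha, if_pos ⟨hb.1, ha.1, hb.2, ha.2⟩]
    · rw [if_neg ha, if_neg (by tauto), pvCell, hb.1]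
  · rw [if_neg hb, if_neg (by tauto), pvCell]

theorem pvSet_length (g : List (List Char)) (x y : Nat) (c : Char) :
    (pvSet g x y c).length = g.length := List.length_set

theorem pvSet_row_length (g : List (List Char)) (x y : Nat) (c : Char) (i : Nat) :
    ((pvSet g x y c).getD i []).length = (g.getD i []).length := by
  rw [pvSet, getD_grid_set]
  by_cases hi : i = y ∧ y < g.length
  · rw [if_pos hi, List.length_set, hi.1]
  · rw [if_neg hi]

theorem foldl_set_length (l : List (Nat × Nat)) (g : List (List Char)) :
    (l.foldl (fun g' p => pvSet g' p.1 p.2 '.') g).length = g.length := by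
  induction l generalizing g with
  | nil => rfl
  | cons p t ih => rw [List.foldl_cons, ih, pvSet_length]

theorem foldl_set_row_length (l : List (Nat × Nat)) (g : List (List Char)) (i : Nat) :
    ((l.foldl (fun g' p => pvSet g' p.1 p.2 '.') g).getD i []).length =
      (g.getD i []).length := by
  induction l generalizing g with
  | nil => rfl
  | cons p t ih => rw [List.foldl_cons, ih, pvSet_row_length]

theorem pvCell_foldl_set (l : List (Nat × Nat)) (g : List (List Char)) (a b : Nat)
    (hval : ∀ p ∈ l, p.2 < g.length ∧ p.1 < (g.getD p.2 []).length) :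
    pvCell (l.foldl (fun g' p => pvSet g' p.1 p.2 '.') g) a b =
      if (a, b) ∈ l then '.' else pvCell g a b := by
  induction l generalizing g with
  | nil => simp
  | cons p t ih =>
    rw [List.foldl_cons]
    rw [ih _ (by
      intro q hq
      have := hval q (List.mem_cons_of_mem _ hq)
      rw [pvSet_length, pvSet_row_length]
      exact this)]
    rw [pvCell_pvSet]
    have hpv := hval p List.mem_cons_self
    by_cases hmem : (a, b) ∈ t
    · simp [hmem]
    · by_cases hp : (a, b) = p
      · have h1 : a = p.1 := by rw [← hp]
        have h2 : b = p.2 := by rw [← hp]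
        rw [if_neg hmem, if_pos ⟨h2, h1, hpv.1, hpv.2⟩, if_pos (by simp [hp])]
      · have hc : ¬(b = p.2 ∧ a = p.1 ∧ p.2 < g.length ∧ p.1 < (g.getD p.2 []).length) := by
          rintro ⟨h2, h1, -⟩
          exact hp (Prod.ext h1 h2)
        rw [if_neg hmem, if_neg hc, if_neg (by simp [hmem, hp])]

theorem mem_pvPositions (g : List (List Char)) (a b : Nat) :
    (a, b) ∈ pvPositions g ↔ a < (g.headD []).length ∧ b < g.length := by
  simp [pvPositions, List.mem_flatMap, List.mem_range]

theorem nodup_pairs {α β : Type} (xs : List α) (ys : List β) (hx : xs.Nodup)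
    (hy : ys.Nodup) : (xs.flatMap fun a => ys.map fun b => (a, b)).Nodup := by
  rw [List.nodup_flatMap]
  refine ⟨fun x _ => hy.map (fun b b' e => by simpa using congrArg Prod.snd e), ?_⟩
  refine hx.imp ?_
  intro a b hab p hp hq
  simp only [List.mem_map] at hp hq
  obtain ⟨u, _, hu⟩ := hp
  obtain ⟨v, _, hv⟩ := hq
  exact hab (by simpa using congrArg Prod.fst (hu.trans hv.symm))

theorem nodup_pvPositions (g : List (List Char)) : (pvPositions g).Nodup :=
  nodup_pairs _ _ List.nodup_range List.nodup_range

theorem mem_pvWpos (g : List (List Char)) (x y a b : Nat) :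
    (a, b) ∈ pvWpos g x y ↔
      (x ≤ a + 1 ∧ a ≤ x + 1 ∧ a < (g.headD []).length ∧
       y ≤ b + 1 ∧ b ≤ y + 1 ∧ b < g.length) := by
  simp only [pvWpos, List.mem_flatMap, List.mem_map, List.mem_range'_1, Prod.mk.injEq]
  constructor
  · rintro ⟨a', ⟨ha1, ha2⟩, b', ⟨hb1, hb2⟩, rfl, rfl⟩
    omega
  · rintro ⟨h1, h2, h3, h4, h5, h6⟩
    exact ⟨a, ⟨by omega, by omega⟩, b, ⟨by omega, by omega⟩, rfl, rfl⟩

theorem nodup_pvWpos (g : List (List Char)) (x y : Nat) : (pvWpos g x y).Nodup :=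
  nodup_pairs _ _ (List.nodup_range' ) (List.nodup_range' )

theorem mem_pvNbrs (w h x y a b : Nat) :
    (a, b) ∈ pvNbrs w h x y ↔
      (a < w ∧ b < h ∧ ¬(a = x ∧ b = y) ∧
       x ≤ a + 1 ∧ a ≤ x + 1 ∧ y ≤ b + 1 ∧ b ≤ y + 1) := by
  simp only [pvNbrs, List.mem_flatMap, List.mem_filterMap]
  constructor
  · rintro ⟨dx, hdx, dy, hdy, hsome⟩
    simp only [List.mem_cons] at hdx hdy
    split_ifs at hsome with h1 h2
    all_goals first
      | (simp only [Option.some.injEq, Prod.mk.injEq] at hsome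
         simp only [List.not_mem_nil, or_false] at hdx hdy
         omega)
      | simp at hsome
  · rintro ⟨h1, h2, h3, h4, h5, h6, h7⟩
    refine ⟨(a : Int) - x, ?_, (b : Int) - y, ?_, ?_⟩
    · simp only [List.mem_cons]; omega
    · simp only [List.mem_cons]; omega
    · rw [if_neg (by omega), if_pos (by omega)]
      simp only [Option.some.injEq, Prod.mk.injEq]
      omega

theorem nodup_pvNbrs (w h x y : Nat) : (pvNbrs w h x y).Nodup := by
  rw [pvNbrs, List.nodup_flatMap]
  constructor
  · intro dx _
    apply List.Nodup.filterMap
    · intro d1 d2 c hc1 hc2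
      split_ifs at hc1 hc2
      all_goals cases hc1 <;>
        simp only [Option.mem_def, Option.some.injEq, Prod.mk.injEq, reduceCtorEq] at hc2 <;>
        omega
    · decide
  · refine List.Pairwise.imp ?_ (by decide : ([-1, 0, 1] : List Int).Pairwise (· ≠ ·))
    intro dx dx' hne p hp hq
    simp only [List.mem_filterMap] at hp hq
    obtain ⟨d1, _, h1⟩ := hp
    obtain ⟨d2, _, h2⟩ := hq
    split_ifs at h1 h2
    all_goals cases h1 <;>
      simp only [Option.mem_def, Option.some.injEq, Prod.mk.injEq, reduceCtorEq] at h2 <;>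
      exact hne (by omega)

theorem pvCnt_getD (w h : Nat) (live : List (Nat × Nat)) (c : Nat × Nat) :
    (pvCnt w h live).getD c 0 =
      (live.countP fun p => decide (c ∈ pvNbrs w h p.1 p.2) : Int) := by
  rw [pvCnt, ← List.foldl_flatMap, PySem.Dict.getD_foldl_modify_add_one,
    PySem.Dict.getD_empty, zero_add, List.count_flatMap]
  rw [← PySem.List.sum_map_ite_one_zero (fun p => decide (c ∈ pvNbrs w h p.1 p.2)) live]
  rw [Nat.cast_list_sum, List.map_map]
  congr 1
  refine List.map_congr_left fun p _ => ?_
  simp [(nodup_pvNbrs w h p.1 p.2).count]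

theorem kernel_counter (g : List (List Char)) (x y : Nat) :
    (PySem.Dict.counter (pvKernel g x y)).getD '@' 0 =
      ((pvWpos g x y).countP fun q => pvCell g q.1 q.2 == '@' : Int) := by
  rw [PySem.Dict.getD_counter, pvKernel, List.count_eq_countP, List.countP_map]
  rfl

theorem headD_eq_getD (l : List (List Char)) : l.headD [] = l.getD 0 [] := by
  cases l <;> rfl

theorem pvAt_pos_of_cell (g : List (List Char)) (x y : Nat) (h : pvCell g x y = '@') :
    0 < pvAt g := by
  obtain ⟨hy, hx⟩ := cell_at_valid g x y h
  have hmemr : '@' ∈ g.getD y [] := by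
    rw [pvCell, List.getD_eq_getElem _ _ hx] at h
    rw [← h]
    exact List.getElem_mem hx
  have hrow : 0 < (g.getD y []).count '@' := List.count_pos_iff.mpr hmemr
  have hmem : (g.getD y []).count '@' ∈ g.map (fun r => r.count '@') :=
    List.mem_map_of_mem (by rw [List.getD_eq_getElem _ _ hy]; exact List.getElem_mem hy)
  exact lt_of_lt_of_le hrow (List.le_sum_of_mem hmem)

theorem round_iff (g : List (List Char)) (live : List (Nat × Nat))
    (hnd : live.Nodup)
    (hinv : ∀ p : Nat × Nat, p ∈ live ↔
      (p.1 < (g.headD []).length ∧ p.2 < g.length ∧ pvCell g p.1 p.2 = '@'))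
    (p : Nat × Nat) (hp : p ∈ live) :
    ((PySem.Dict.counter (pvKernel g p.1 p.2)).getD '@' 0 < 5 ↔
      (pvCnt (g.headD []).length g.length live).getD p 0 < 4) := by
  obtain ⟨x, y⟩ := p
  obtain ⟨hx, hy, hc⟩ := (hinv _).mp hp
  rw [kernel_counter, pvCnt_getD]
  have hpw : (x, y) ∈ pvWpos g x y := (mem_pvWpos g x y x y).mpr (by
    refine ⟨by omega, by omega, hx, by omega, by omega, hy⟩)
  have hperm := (List.perm_cons_erase hpw).countP_eq
    (p := fun q => pvCell g q.1 q.2 == '@')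
  rw [hperm, List.countP_cons]
  simp only [hc, beq_self_eq_true, if_pos]
  have heq : ((pvWpos g x y).erase (x, y)).countP (fun q => pvCell g q.1 q.2 == '@') =
      live.countP (fun q => decide ((x, y) ∈ pvNbrs (g.headD []).length g.length q.1 q.2)) := by
    refine countP_eq_countP_of_nodup _ _ _ _ ((nodup_pvWpos g x y).erase _) hnd ?_
    rintro ⟨a, b⟩
    rw [(nodup_pvWpos g x y).mem_erase_iff]
    simp only [beq_iff_eq, decide_eq_true_eq, mem_pvWpos, mem_pvNbrs, Prod.mk.injEq, ne_eq]
    constructor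
    · rintro ⟨⟨hne, h1, h2, h3, h4, h5, h6⟩, hcell⟩
      refine ⟨(hinv _).mpr ⟨h3, h6, hcell⟩, hx, hy, ?_, by omega, by omega, by omega, by omega⟩
      intro hcon
      exact hne ⟨hcon.1.symm, hcon.2.symm⟩
    · rintro ⟨hlive, _, _, hne, h4, h5, h6, h7⟩
      obtain ⟨ha, hb, hcell⟩ := (hinv _).mp hlive
      refine ⟨⟨?_, by omega, by omega, ha, by omega, by omega, hb⟩, hcell⟩
      intro hcon
      exact hne ⟨hcon.1.symm, hcon.2.symm⟩
  rw [heq]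
  omega

theorem part2_main : ∀ (n : Nat) (g : List (List Char)) (live : PySem.Set (Nat × Nat))
    (result : Int), pvAt g ≤ n → live.Nodup →
    (∀ p : Nat × Nat, p ∈ live ↔
      (p.1 < (g.headD []).length ∧ p.2 < g.length ∧ pvCell g p.1 p.2 = '@')) →
    part2go g result = pvRounds (g.headD []).length g.length live result := by
  intro n
  induction n with
  | zero =>
    intro g live result hat hnd hinv
    have hnoat : ∀ p : Nat × Nat, pvCell g p.1 p.2 ≠ '@' := by
      intro p hc
      have := pvAt_pos_of_cell g p.1 p.2 hc
      omega
    have hlive : live = [] := by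
      apply List.eq_nil_iff_forall_not_mem.mpr
      intro p hp
      exact hnoat p ((hinv p).mp hp).2.2
    rw [part2go, pvRounds]
    have hrmA : (pvScanA g result).2 = [] := by
      rw [pvScanA_eq]
      apply List.filter_eq_nil_iff.mpr
      intro p _
      simp only [Bool.and_eq_true, beq_iff_eq, not_and]
      intro hc
      exact absurd hc (hnoat p)
    have hrmB : pvRmB (g.headD []).length g.length live = [] := by
      rw [pvRmB, hlive]
      rfl
    have hfil : (pvPositions g).filter (fun p =>
        pvCell g p.1 p.2 == '@' &&
          decide ((PySem.Dict.counter (pvKernel g p.1 p.2)).getD '@' 0 < 5)) = [] := by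
      rw [pvScanA_eq] at hrmA
      exact hrmA
    rw [dif_pos hrmA, dif_pos hrmB, pvScanA_eq]
    rw [List.countP_eq_length_filter, hfil]
    simp
  | succ n ih =>
    intro g live result hat hnd hinv
    set w := (g.headD []).length with hw
    set h := g.length with hh
    set condA : Nat × Nat → Bool := fun p =>
      pvCell g p.1 p.2 == '@' &&
        decide ((PySem.Dict.counter (pvKernel g p.1 p.2)).getD '@' 0 < 5) with hcondA
    have hmemeq : ∀ q, q ∈ (pvPositions g).filter condA ↔ q ∈ pvRmB w h live := by
      intro q
      rw [pvRmB]
      simp only [List.mem_filter]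
      constructor
      · rintro ⟨hqpos, hcond⟩
        simp only [hcondA, Bool.and_eq_true, beq_iff_eq, decide_eq_true_eq] at hcond
        have hbounds := (mem_pvPositions g q.1 q.2).mp (by
          simpa using hqpos)
        have hqlive : q ∈ live := (hinv q).mpr ⟨hbounds.1, hbounds.2, hcond.1⟩
        refine ⟨hqlive, ?_⟩
        simp only [decide_eq_true_eq]
        exact (round_iff g live hnd hinv q hqlive).mp hcond.2
      · rintro ⟨hqlive, hcond⟩
        simp only [decide_eq_true_eq] at hcond
        obtain ⟨hb1, hb2, hcell⟩ := (hinv q).mp hqlive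
        refine ⟨by simpa using (mem_pvPositions g q.1 q.2).mpr ⟨hb1, hb2⟩, ?_⟩
        simp only [hcondA, Bool.and_eq_true, beq_iff_eq, decide_eq_true_eq]
        exact ⟨hcell, (round_iff g live hnd hinv q hqlive).mpr hcond⟩
    have hperm : ((pvPositions g).filter condA).Perm (pvRmB w h live) :=
      (List.perm_ext_iff_of_nodup ((nodup_pvPositions g).filter _)
        (hnd.filter _)).mpr hmemeq
    rw [part2go, pvRounds]
    by_cases hnil : pvRmB w h live = []
    · have hfil : (pvPositions g).filter condA = [] :=
        List.Perm.eq_nil (hnil ▸ hperm)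
      have hrmA : (pvScanA g result).2 = [] := by
        rw [pvScanA_eq, ← hcondA]
        exact hfil
      rw [dif_pos hrmA, dif_pos hnil, pvScanA_eq]
      rw [List.countP_eq_length_filter, ← hcondA, hfil]
      simp
    · have hfilne : (pvPositions g).filter condA ≠ [] := by
        intro hcon
        exact hnil ((hcon ▸ hperm).symm.eq_nil)
      have hrmA : (pvScanA g result).2 ≠ [] := by
        rw [pvScanA_eq, ← hcondA]
        exact hfilne
      rw [dif_neg hrmA, dif_neg hnil]
      have hsc2 : (pvScanA g result).2 = (pvPositions g).filter condA := by
        rw [pvScanA_eq, ← hcondA]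
      have hsc1 : (pvScanA g result).1 = result + ((pvRmB w h live).length : Int) := by
        rw [pvScanA_eq]
        have h1 : (pvPositions g).countP condA = (pvRmB w h live).length := by
          rw [List.countP_eq_length_filter]
          exact hperm.length_eq
        rw [← hcondA]
        simp [h1]
      rw [hsc1, hsc2]
      have hvalid : ∀ p ∈ (pvPositions g).filter condA, pvCell g p.1 p.2 = '@' := by
        intro p hp
        have := (List.mem_filter.mp hp).2
        rw [hcondA] at this
        simp only [Bool.and_eq_true, beq_iff_eq] at this
        exact this.1
      have hcells : ∀ a b,
          pvCell (((pvPositions g).filter condA).reverse.foldl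
            (fun g' p => pvSet g' p.1 p.2 '.') g) a b =
          if (a, b) ∈ (pvPositions g).filter condA then '.' else pvCell g a b := by
        intro a b
        rw [pvCell_foldl_set _ _ _ _ (fun p hp =>
          cell_at_valid g p.1 p.2 (hvalid p (List.mem_reverse.mp hp)))]
        simp [List.mem_reverse]
      have hlen : (((pvPositions g).filter condA).reverse.foldl
          (fun g' p => pvSet g' p.1 p.2 '.') g).length = g.length :=
        foldl_set_length _ _
      have hwid : ((((pvPositions g).filter condA).reverse.foldl
          (fun g' p => pvSet g' p.1 p.2 '.') g).headD []).length = w := by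
        rw [headD_eq_getD, foldl_set_row_length, ← headD_eq_getD]
      have hat' : pvAt (((pvPositions g).filter condA).reverse.foldl
          (fun g' p => pvSet g' p.1 p.2 '.') g) ≤ n := by
        have hlt := pvAt_erase_lt g _ hfilne hvalid
        omega
      have hinv' : ∀ p : Nat × Nat, p ∈ PySem.Set.diff live (pvRmB w h live) ↔
          (p.1 < ((((pvPositions g).filter condA).reverse.foldl
              (fun g' p => pvSet g' p.1 p.2 '.') g).headD []).length ∧
           p.2 < (((pvPositions g).filter condA).reverse.foldl
              (fun g' p => pvSet g' p.1 p.2 '.') g).length ∧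
           pvCell (((pvPositions g).filter condA).reverse.foldl
              (fun g' p => pvSet g' p.1 p.2 '.') g) p.1 p.2 = '@') := by
        intro p
        rw [PySem.Set.mem_diff, hwid, hlen, hcells]
        constructor
        · rintro ⟨hpl, hprm⟩
          obtain ⟨h1, h2, h3⟩ := (hinv p).mp hpl
          have hpA : (p.1, p.2) ∉ (pvPositions g).filter condA := fun hc =>
            hprm ((hmemeq p).mp hc)
          rw [if_neg hpA]
          exact ⟨h1, h2, h3⟩
        · rintro ⟨h1, h2, h3⟩
          by_cases hpA : (p.1, p.2) ∈ (pvPositions g).filter condA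
          · rw [if_pos hpA] at h3
            exact absurd h3 (by decide)
          · rw [if_neg hpA] at h3
            have hpl : p ∈ live := (hinv p).mpr ⟨h1, h2, h3⟩
            exact ⟨hpl, fun hc => hpA ((hmemeq p).mpr hc)⟩
      have hndiff : (PySem.Set.diff live (pvRmB w h live)).Nodup := by
        have := hnd.filter (fun x => !(pvRmB w h live).contains x)
        simpa [PySem.Set.diff] using this
      have hstep := ih _ (PySem.Set.diff live (pvRmB w h live))
        (result + ((pvRmB w h live).length : Int)) hat' hndiff hinv'
      rw [hstep, hwid, hlen]

-- ---- abstract peeling theory: pvDeg / pvPeel / pvStable and uniqueness ----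

def pvDeg (w h : Nat) (F : Finset (Nat × Nat)) (c : Nat × Nat) : Nat :=
  (F.filter (fun p => p ∈ pvNbrs w h c.1 c.2)).card

def pvStable (w h : Nat) (F : Finset (Nat × Nat)) : Prop :=
  ∀ c ∈ F, 4 ≤ pvDeg w h F c

def pvPeel (w h : Nat) : Finset (Nat × Nat) → List (Nat × Nat) → Prop
  | _, [] => True
  | F, c :: σ => c ∈ F ∧ pvDeg w h F c < 4 ∧ pvPeel w h (F.erase c) σ

theorem pvDeg_mono (w h : Nat) {F G : Finset (Nat × Nat)} (hFG : F ⊆ G) (c : Nat × Nat) :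
    pvDeg w h F c ≤ pvDeg w h G c :=
  Finset.card_le_card (Finset.filter_subset_filter _ hFG)

theorem pvDeg_erase_mem (w h : Nat) (F : Finset (Nat × Nat)) (c n : Nat × Nat)
    (hc : c ∈ F) (hn : c ∈ pvNbrs w h n.1 n.2) :
    pvDeg w h (F.erase c) n + 1 = pvDeg w h F n := by
  unfold pvDeg
  rw [Finset.filter_erase]
  exact Finset.card_erase_add_one (Finset.mem_filter.mpr ⟨hc, hn⟩)

theorem pvDeg_erase_not (w h : Nat) (F : Finset (Nat × Nat)) (c n : Nat × Nat)
    (hn : c ∉ pvNbrs w h n.1 n.2) :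
    pvDeg w h (F.erase c) n = pvDeg w h F n := by
  unfold pvDeg
  rw [Finset.filter_erase, Finset.erase_eq_of_notMem]
  intro hmem
  exact hn (Finset.mem_filter.mp hmem).2

theorem pvPeel_subset (w h : Nat) :
    ∀ (σ : List (Nat × Nat)) (F : Finset (Nat × Nat)), pvPeel w h F σ → ∀ c ∈ σ, c ∈ F := by
  intro σ
  induction σ with
  | nil => intro F _ c hc; simp at hc
  | cons a σ ih =>
    intro F hp c hc
    rcases List.mem_cons.mp hc with rfl | hc
    · exact hp.1
    · exact Finset.mem_of_mem_erase (ih (F.erase a) hp.2.2 c hc)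

theorem pvPeel_nodup (w h : Nat) :
    ∀ (σ : List (Nat × Nat)) (F : Finset (Nat × Nat)), pvPeel w h F σ → σ.Nodup := by
  intro σ
  induction σ with
  | nil => intro F _; simp
  | cons a σ ih =>
    intro F hp
    refine List.nodup_cons.mpr ⟨?_, ih _ hp.2.2⟩
    intro hmem
    have := pvPeel_subset w h σ (F.erase a) hp.2.2 a hmem
    exact absurd this (Finset.notMem_erase a F)

theorem pvPeel_avoid (w h : Nat) :
    ∀ (σ : List (Nat × Nat)) (F G : Finset (Nat × Nat)), pvPeel w h F σ → G ⊆ F →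
      pvStable w h G → ∀ c ∈ σ, c ∉ G := by
  intro σ
  induction σ with
  | nil => intro F G _ _ _ c hc; simp at hc
  | cons a σ ih =>
    intro F G hp hGF hst c hc
    have haG : a ∉ G := by
      intro haG
      have h1 := hst a haG
      have h2 := pvDeg_mono w h hGF a
      have h3 := hp.2.1
      omega
    rcases List.mem_cons.mp hc with rfl | hc
    · exact haG
    · exact ih (F.erase a) G hp.2.2
        (fun x hx => Finset.mem_erase.mpr ⟨fun e => haG (e ▸ hx), hGF hx⟩) hst c hc

theorem pvPeel_append (w h : Nat) :
    ∀ (ρ σ : List (Nat × Nat)) (F : Finset (Nat × Nat)),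
      pvPeel w h F ρ → pvPeel w h (F \ ρ.toFinset) σ → pvPeel w h F (ρ ++ σ) := by
  intro ρ
  induction ρ with
  | nil => intro σ F _ hσ; simpa using hσ
  | cons a ρ ih =>
    intro σ F hρ hσ
    refine ⟨hρ.1, hρ.2.1, ?_⟩
    apply ih σ (F.erase a) hρ.2.2
    have hset : F \ (a :: ρ).toFinset = (F.erase a) \ ρ.toFinset := by
      ext x
      simp only [List.toFinset_cons, Finset.mem_sdiff, Finset.mem_insert, Finset.mem_erase]
      tauto
    rw [← hset]
    exact hσ

theorem pvPeel_of_all_low (w h : Nat) :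
    ∀ (σ : List (Nat × Nat)) (F : Finset (Nat × Nat)), σ.Nodup →
      (∀ c ∈ σ, c ∈ F ∧ pvDeg w h F c < 4) → pvPeel w h F σ := by
  intro σ
  induction σ with
  | nil => intro F _ _; trivial
  | cons a σ ih =>
    intro F hnd hall
    obtain ⟨haF, haD⟩ := hall a List.mem_cons_self
    refine ⟨haF, haD, ih (F.erase a) (List.nodup_cons.mp hnd).2 ?_⟩
    intro c hc
    obtain ⟨hcF, hcD⟩ := hall c (List.mem_cons_of_mem _ hc)
    have hca : c ≠ a := fun e => (List.nodup_cons.mp hnd).1 (e ▸ hc)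
    exact ⟨Finset.mem_erase.mpr ⟨hca, hcF⟩,
      lt_of_le_of_lt (pvDeg_mono w h (Finset.erase_subset a F) c) hcD⟩

theorem pvPeel_length_unique (w h : Nat) (F : Finset (Nat × Nat)) (σ1 σ2 : List (Nat × Nat))
    (h1 : pvPeel w h F σ1) (hs1 : pvStable w h (F \ σ1.toFinset))
    (h2 : pvPeel w h F σ2) (hs2 : pvStable w h (F \ σ2.toFinset)) :
    σ1.length = σ2.length := by
  have hsub : ∀ (τ1 τ2 : List (Nat × Nat)), pvPeel w h F τ1 → pvPeel w h F τ2 →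
      pvStable w h (F \ τ2.toFinset) → τ1.toFinset ⊆ τ2.toFinset := by
    intro τ1 τ2 hp1 _ hst x hx
    rw [List.mem_toFinset] at hx
    have hxF : x ∈ F := pvPeel_subset w h τ1 F hp1 x hx
    have havoid := pvPeel_avoid w h τ1 F (F \ τ2.toFinset) hp1 Finset.sdiff_subset hst x hx
    by_contra hxs
    exact havoid (Finset.mem_sdiff.mpr ⟨hxF, hxs⟩)
  have heq : σ1.toFinset = σ2.toFinset :=
    Finset.Subset.antisymm (hsub σ1 σ2 h1 h2 hs2) (hsub σ2 σ1 h2 h1 hs1)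
  rw [← List.toFinset_card_of_nodup (pvPeel_nodup w h σ1 F h1),
    ← List.toFinset_card_of_nodup (pvPeel_nodup w h σ2 F h2), heq]

-- ---- bridges between list-level counts and pvDeg ----

theorem pvNbrs_not_self (w h : Nat) (p : Nat × Nat) : p ∉ pvNbrs w h p.1 p.2 := by
  obtain ⟨a, b⟩ := p
  intro hmem
  rw [mem_pvNbrs] at hmem
  omega

theorem pvNbrs_symm (w h : Nat) (p q : Nat × Nat)
    (hp1 : p.1 < w) (hp2 : p.2 < h) (hq1 : q.1 < w) (hq2 : q.2 < h) :
    p ∈ pvNbrs w h q.1 q.2 ↔ q ∈ pvNbrs w h p.1 p.2 := by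
  obtain ⟨a, b⟩ := p
  obtain ⟨x, y⟩ := q
  rw [mem_pvNbrs, mem_pvNbrs]
  simp only at hp1 hp2 hq1 hq2
  omega

theorem countP_mem_card {α : Type} [DecidableEq α] (l : List α) (hl : l.Nodup)
    (P : α → Prop) [DecidablePred P] :
    l.countP (fun a => decide (P a)) = (l.toFinset.filter P).card := by
  rw [List.countP_eq_length_filter,
    ← List.toFinset_card_of_nodup (hl.filter _), List.toFinset_filter]
  congr 1
  ext x
  simp

theorem pvCnt_eq_pvDeg (w h : Nat) (live : List (Nat × Nat)) (hld : live.Nodup)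
    (hrect : ∀ p ∈ live, p.1 < w ∧ p.2 < h) (c : Nat × Nat)
    (hc1 : c.1 < w) (hc2 : c.2 < h) :
    (pvCnt w h live).getD c 0 = (pvDeg w h live.toFinset c : Int) := by
  rw [pvCnt_getD]
  have hcnt : live.countP (fun p => decide (c ∈ pvNbrs w h p.1 p.2)) =
      pvDeg w h live.toFinset c := by
    have hsw : live.countP (fun p => decide (c ∈ pvNbrs w h p.1 p.2)) =
        live.countP (fun p => decide (p ∈ pvNbrs w h c.1 c.2)) :=
      List.countP_congr (fun p hp => by
        simp only [decide_eq_true_eq]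
        exact pvNbrs_symm w h c p hc1 hc2 (hrect p hp).1 (hrect p hp).2)
    rw [hsw, countP_mem_card live hld (fun p => p ∈ pvNbrs w h c.1 c.2)]
    rfl
  rw [hcnt]

theorem foldl_insert_const_getD (v : Nat × Nat → Int) :
    ∀ (l : List (Nat × Nat)) (d : PySem.Dict (Nat × Nat) Int) (n : Nat × Nat),
    (l.foldl (fun d c => d.insert c (v c)) d).getD n 0 =
      if n ∈ l then v n else d.getD n 0 := by
  intro l
  induction l with
  | nil => intro d n; simp
  | cons c t ih =>
    intro d n
    rw [List.foldl_cons, ih]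
    by_cases hnt : n ∈ t
    · simp [hnt]
    · by_cases hnc : n = c
      · subst hnc
        simp [hnt, PySem.Dict.getD_insert_self]
      · rw [if_neg hnt, if_neg (by simp [hnc, hnt] : ¬ n ∈ c :: t),
          PySem.Dict.getD_insert_of_ne _ _ _ hnc]

theorem pvDegInit_getD (w h : Nat) (live : List (Nat × Nat)) (n : Nat × Nat)
    (hn : n ∈ live) :
    (pvDegInit w h live).getD n 0 =
      ((pvNbrs w h n.1 n.2).countP (fun m => live.contains m) : Int) := by
  unfold pvDegInit
  rw [foldl_insert_const_getD, if_pos hn]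

theorem countP_contains_eq_pvDeg (w h : Nat) (live : List (Nat × Nat)) (hld : live.Nodup)
    (n : Nat × Nat) :
    (pvNbrs w h n.1 n.2).countP (fun m => live.contains m) = pvDeg w h live.toFinset n := by
  have h1 : (pvNbrs w h n.1 n.2).countP (fun m => live.contains m)
      = (pvNbrs w h n.1 n.2).countP (fun m => decide (m ∈ live)) :=
    List.countP_congr (fun m _ => by
      rw [Bool.eq_iff_iff]
      simp [List.contains_iff_mem])
  rw [h1, countP_mem_card _ (nodup_pvNbrs w h n.1 n.2) (fun m => m ∈ live)]
  unfold pvDeg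
  congr 1
  ext x
  simp only [Finset.mem_filter, List.mem_toFinset]
  tauto

theorem mem_pvLiveInit (rows : List (List Char)) (w h : Nat) (p : Nat × Nat) :
    p ∈ pvLiveInit rows w h ↔ p.1 < w ∧ p.2 < h ∧ pvCell rows p.1 p.2 = '@' := by
  obtain ⟨a, b⟩ := p
  rw [pvLiveInit, PySem.Set.mem_ofList]
  simp only [List.mem_flatMap, List.mem_filterMap, List.mem_range]
  constructor
  · rintro ⟨y, hy, x, hx, hsome⟩
    split_ifs at hsome with hc
    · injection hsome with h1
      injection h1 with ha hb
      subst ha; subst hb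
      exact ⟨hx, hy, by simpa using hc⟩
  · rintro ⟨h1, h2, h3⟩
    exact ⟨b, h2, a, h1, by rw [if_pos (by simpa using h3)]⟩

-- ---- rounds compute a maximal peel ----

theorem rounds_peel : ∀ (n w h : Nat) (live : PySem.Set (Nat × Nat)) (res : Int),
    live.length ≤ n → live.Nodup → (∀ p ∈ live, p.1 < w ∧ p.2 < h) →
    ∃ σ, pvPeel w h live.toFinset σ ∧ pvStable w h (live.toFinset \ σ.toFinset) ∧
      pvRounds w h live res = res + σ.length := by
  intro n
  induction n with
  | zero =>
    intro w h live res hlen hnd hrect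
    have hnil : live = [] := List.eq_nil_of_length_eq_zero (Nat.le_zero.mp hlen)
    subst hnil
    refine ⟨[], trivial, ?_, ?_⟩
    · intro c hc
      simp at hc
    · have hrm0 : pvRmB w h ([] : PySem.Set (Nat × Nat)) = [] := rfl
      rw [pvRounds, dif_pos hrm0]
      simp
  | succ n ih =>
    intro w h live res hlen hnd hrect
    by_cases hrm : pvRmB w h live = []
    · refine ⟨[], trivial, ?_, ?_⟩
      · intro c hc
        simp only [List.toFinset_nil, Finset.sdiff_empty, List.mem_toFinset] at hc
        have hnotrm : ¬ (decide ((pvCnt w h live).getD c 0 < 4) = true) := by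
          intro hdec
          have hmem : c ∈ pvRmB w h live := List.mem_filter.mpr ⟨hc, hdec⟩
          rw [hrm] at hmem
          simp at hmem
        rw [pvCnt_eq_pvDeg w h live hnd hrect c (hrect c hc).1 (hrect c hc).2] at hnotrm
        simp only [decide_eq_true_eq, not_lt] at hnotrm
        exact_mod_cast hnotrm
      · rw [pvRounds, dif_pos hrm]
        simp
    · have hsubrm : ∀ c ∈ pvRmB w h live, c ∈ live ∧ pvDeg w h live.toFinset c < 4 := by
        intro c hc
        have hmf := List.mem_filter.mp hc
        refine ⟨hmf.1, ?_⟩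
        have hd := hmf.2
        rw [pvCnt_eq_pvDeg w h live hnd hrect c (hrect c hmf.1).1 (hrect c hmf.1).2] at hd
        simp only [decide_eq_true_eq] at hd
        exact_mod_cast hd
      have hrmnd : (pvRmB w h live).Nodup := hnd.filter _
      have hpeel1 : pvPeel w h live.toFinset (pvRmB w h live) :=
        pvPeel_of_all_low w h (pvRmB w h live) live.toFinset hrmnd
          (fun c hc => ⟨List.mem_toFinset.mpr (hsubrm c hc).1, (hsubrm c hc).2⟩)
      have hdmem : ∀ x : Nat × Nat, x ∈ PySem.Set.diff live (pvRmB w h live) ↔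
          x ∈ live ∧ x ∉ pvRmB w h live := fun x => PySem.Set.mem_diff _ _ x
      have hdF : (PySem.Set.diff live (pvRmB w h live)).toFinset =
          live.toFinset \ (pvRmB w h live).toFinset := by
        ext x
        simp only [List.mem_toFinset, Finset.mem_sdiff]
        exact hdmem x
      have hnd' : (PySem.Set.diff live (pvRmB w h live)).Nodup := by
        have := hnd.filter (fun x => !((pvRmB w h live).contains x))
        simpa [PySem.Set.diff] using this
      have hrect' : ∀ p ∈ PySem.Set.diff live (pvRmB w h live), p.1 < w ∧ p.2 < h :=
        fun p hp => hrect p ((hdmem p).mp hp).1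
      have hlen' : (PySem.Set.diff live (pvRmB w h live)).length ≤ n := by
        have := pvRmB_len_lt w h live hrm
        omega
      obtain ⟨σ', hp', hs', hres'⟩ :=
        ih w h (PySem.Set.diff live (pvRmB w h live))
          (res + ((pvRmB w h live).length : Int)) hlen' hnd' hrect'
      refine ⟨pvRmB w h live ++ σ', ?_, ?_, ?_⟩
      · exact pvPeel_append w h (pvRmB w h live) σ' live.toFinset hpeel1
          (by rw [← hdF]; exact hp')
      · have hset : live.toFinset \ (pvRmB w h live ++ σ').toFinset =
            (PySem.Set.diff live (pvRmB w h live)).toFinset \ σ'.toFinset := by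
          rw [hdF]
          ext x
          simp only [Finset.mem_sdiff, List.toFinset_append, Finset.mem_union,
            List.mem_toFinset]
          tauto
        rw [hset]
        exact hs'
      · rw [pvRounds, dif_neg hrm, hres']
        simp only [List.length_append]
        push_cast
        ring

-- ---- the worklist maintains a peel: fold invariant and main induction ----

theorem pvFold_inv (w h : Nat) (live : List (Nat × Nat))
    (hrect : ∀ p ∈ live, p.1 < w ∧ p.2 < h)
    (c : Nat × Nat) (hcl : c ∈ live) (P : Finset (Nat × Nat)) (hcP : c ∉ P) :
    ∀ (L : List (Nat × Nat)) (d : PySem.Dict (Nat × Nat) Int)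
      (r : PySem.Set (Nat × Nat)) (s : List (Nat × Nat)),
    L.Nodup → (∀ n ∈ L, n ∈ pvNbrs w h c.1 c.2) →
    r.toFinset = insert c P ∪ s.toFinset →
    Disjoint (insert c P) s.toFinset →
    s.Nodup →
    (∀ p ∈ r, p ∈ live) →
    (∀ n : Nat × Nat, n ∈ live → n ∉ r →
      if n ∈ L then
        d.getD n 0 = (pvDeg w h (live.toFinset \ P) n : Int) ∧
          4 ≤ pvDeg w h (live.toFinset \ P) n
      else
        d.getD n 0 = (pvDeg w h (live.toFinset \ insert c P) n : Int) ∧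
          4 ≤ pvDeg w h (live.toFinset \ insert c P) n) →
    (∀ a ∈ s, pvDeg w h (live.toFinset \ insert c P) a < 4) →
    ((L.foldl (pvStepF live) (d, r, s)).2.1.toFinset =
        insert c P ∪ (L.foldl (pvStepF live) (d, r, s)).2.2.toFinset ∧
     Disjoint (insert c P) (L.foldl (pvStepF live) (d, r, s)).2.2.toFinset ∧
     (L.foldl (pvStepF live) (d, r, s)).2.2.Nodup ∧
     (∀ p ∈ (L.foldl (pvStepF live) (d, r, s)).2.1, p ∈ live) ∧
     (∀ n : Nat × Nat, n ∈ live → n ∉ (L.foldl (pvStepF live) (d, r, s)).2.1 →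
        (L.foldl (pvStepF live) (d, r, s)).1.getD n 0 =
            (pvDeg w h (live.toFinset \ insert c P) n : Int) ∧
          4 ≤ pvDeg w h (live.toFinset \ insert c P) n) ∧
     (∀ a ∈ (L.foldl (pvStepF live) (d, r, s)).2.2,
        pvDeg w h (live.toFinset \ insert c P) a < 4)) := by
  intro L
  induction L with
  | nil =>
    intro d r s _ _ h1 h2 h3 h4 h5 h6
    simp only [List.foldl_nil]
    refine ⟨h1, h2, h3, h4, ?_, h6⟩
    intro n hn hnr
    have := h5 n hn hnr
    simpa using this
  | cons n L ih =>
    intro d r s hnd hLN h1 h2 h3 h4 h5 h6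
    have hnL : n ∉ L := (List.nodup_cons.mp hnd).1
    have hnN : n ∈ pvNbrs w h c.1 c.2 := hLN n List.mem_cons_self
    have hnc : n ≠ c := by
      intro e
      subst e
      exact pvNbrs_not_self w h n hnN
    rw [List.foldl_cons]
    by_cases hg : (live.contains n && !(PySem.Set.contains r n)) = true
    · have hnlive : n ∈ live := List.contains_iff_mem.mp ((Bool.and_eq_true _ _).mp hg).1
      have hnr : n ∉ r := by
        have h2' := ((Bool.and_eq_true _ _).mp hg).2
        rw [Bool.not_eq_true', pvSetContains_eq] at h2'
        simpa using h2'
      have hnP' : n ∉ insert c P := by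
        intro hmem
        have hmem2 : n ∈ r.toFinset := by
          rw [h1]
          exact Finset.mem_union_left _ hmem
        exact hnr (List.mem_toFinset.mp hmem2)
      have hND := h5 n hnlive hnr
      rw [if_pos List.mem_cons_self] at hND
      obtain ⟨hdg, hge⟩ := hND
      have hcF : c ∈ live.toFinset \ P :=
        Finset.mem_sdiff.mpr ⟨List.mem_toFinset.mpr hcl, hcP⟩
      have hcn : c ∈ pvNbrs w h n.1 n.2 :=
        (pvNbrs_symm w h c n (hrect c hcl).1 (hrect c hcl).2
          (hrect n hnlive).1 (hrect n hnlive).2).mpr hnN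
      have hN1 : pvDeg w h (live.toFinset \ insert c P) n + 1 =
          pvDeg w h (live.toFinset \ P) n := by
        rw [Finset.sdiff_insert]
        exact pvDeg_erase_mem w h _ c n hcF hcn
      have hd' : (d.modify n 0 (· - 1)).getD n 0 =
          (pvDeg w h (live.toFinset \ insert c P) n : Int) := by
        rw [PySem.Dict.getD_modify_self, hdg]
        omega
      have hmemr : ∀ x : Nat × Nat, x ∈ r ↔ x ∈ insert c P ∨ x ∈ s := by
        intro x
        rw [← List.mem_toFinset, h1]
        simp [or_assoc]
      by_cases hlt : (d.modify n 0 (· - 1)).getD n 0 < 4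
      · have hstep : pvStepF live (d, r, s) n =
            (d.modify n 0 (· - 1), PySem.Set.add r n, n :: s) := by
          unfold pvStepF
          rw [if_pos hg, if_pos hlt]
        rw [hstep]
        have hN1lt : pvDeg w h (live.toFinset \ insert c P) n < 4 := by
          rw [hd'] at hlt
          exact_mod_cast hlt
        apply ih
        · exact (List.nodup_cons.mp hnd).2
        · exact fun m hm => hLN m (List.mem_cons_of_mem _ hm)
        · ext x
          simp only [List.toFinset_cons, Finset.mem_union, Finset.mem_insert,
            List.mem_toFinset, PySem.Set.mem_add]
          rw [hmemr x]
          simp only [Finset.mem_insert]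
          tauto
        · rw [Finset.disjoint_left]
          intro x hx hmem
          rw [List.toFinset_cons, Finset.mem_insert] at hmem
          rcases hmem with rfl | hmem
          · exact hnP' hx
          · exact Finset.disjoint_left.mp h2 hx hmem
        · exact List.nodup_cons.mpr ⟨fun hns => hnr ((hmemr n).mpr (Or.inr hns)), h3⟩
        · intro p hp
          rw [PySem.Set.mem_add] at hp
          rcases hp with hp | rfl
          · exact h4 p hp
          · exact hnlive
        · intro m hm hmr'
          have hmn : m ≠ n := by
            intro e
            subst e
            exact hmr' (by rw [PySem.Set.mem_add]; exact Or.inr rfl)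
          have hmr : m ∉ r := fun hmem => hmr' (by rw [PySem.Set.mem_add]; exact Or.inl hmem)
          have hold := h5 m hm hmr
          have hdm : (d.modify n 0 (· - 1)).getD m 0 = d.getD m 0 := by
            rw [PySem.Dict.getD_modify, if_neg hmn]
          by_cases hmL : m ∈ L
          · rw [if_pos (List.mem_cons_of_mem _ hmL)] at hold
            rw [if_pos hmL, hdm]
            exact hold
          · rw [if_neg (by simp [hmn, hmL] : ¬ m ∈ n :: L)] at hold
            rw [if_neg hmL, hdm]
            exact hold
        · intro a ha
          rcases List.mem_cons.mp ha with rfl | ha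
          · exact hN1lt
          · exact h6 a ha
      · have hstep : pvStepF live (d, r, s) n =
            (d.modify n 0 (· - 1), r, s) := by
          unfold pvStepF
          rw [if_pos hg, if_neg hlt]
        rw [hstep]
        have hN1ge : 4 ≤ pvDeg w h (live.toFinset \ insert c P) n := by
          rw [hd'] at hlt
          omega
        apply ih
        · exact (List.nodup_cons.mp hnd).2
        · exact fun m hm => hLN m (List.mem_cons_of_mem _ hm)
        · exact h1
        · exact h2
        · exact h3
        · exact h4
        · intro m hm hmr
          have hold := h5 m hm hmr
          by_cases hmL : m ∈ L
          · have hmn : m ≠ n := fun e => hnL (e ▸ hmL)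
            rw [if_pos (List.mem_cons_of_mem _ hmL)] at hold
            rw [if_pos hmL, PySem.Dict.getD_modify, if_neg hmn]
            exact hold
          · rw [if_neg hmL]
            by_cases hmn : m = n
            · subst hmn
              exact ⟨hd', hN1ge⟩
            · rw [if_neg (by simp [hmn, hmL] : ¬ m ∈ n :: L)] at hold
              rw [PySem.Dict.getD_modify, if_neg hmn]
              exact hold
        · exact h6
    · have hstep : pvStepF live (d, r, s) n = (d, r, s) := by
        unfold pvStepF
        rw [if_neg hg]
      rw [hstep]
      apply ih
      · exact (List.nodup_cons.mp hnd).2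
      · exact fun m hm => hLN m (List.mem_cons_of_mem _ hm)
      · exact h1
      · exact h2
      · exact h3
      · exact h4
      · intro m hm hmr
        have hold := h5 m hm hmr
        by_cases hmL : m ∈ L
        · rw [if_pos (List.mem_cons_of_mem _ hmL)] at hold
          rw [if_pos hmL]
          exact hold
        · have hmn : m ≠ n := by
            intro e
            subst e
            apply hg
            rw [Bool.and_eq_true, Bool.not_eq_true', pvSetContains_eq]
            exact ⟨List.contains_iff_mem.mpr hm, by simpa using hmr⟩
          rw [if_neg (by simp [hmn, hmL] : ¬ m ∈ n :: L)] at hold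
          rw [if_neg hmL]
          exact hold
      · exact h6

theorem pvStable_of_ge (w h : Nat) (live : List (Nat × Nat)) (r : PySem.Set (Nat × Nat))
    (P : Finset (Nat × Nat)) (h1 : r.toFinset = P)
    (h5 : ∀ n : Nat × Nat, n ∈ live → n ∉ r → 4 ≤ pvDeg w h (live.toFinset \ P) n) :
    pvStable w h (live.toFinset \ P) := by
  intro x hx
  obtain ⟨hxF, hxP⟩ := Finset.mem_sdiff.mp hx
  have hxl := List.mem_toFinset.mp hxF
  have hxr : x ∉ r := fun hmem => hxP (by rw [← h1]; exact List.mem_toFinset.mpr hmem)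
  exact h5 x hxl hxr

theorem go_peel (w h : Nat) (live : List (Nat × Nat)) (hld : live.Nodup)
    (hrect : ∀ p ∈ live, p.1 < w ∧ p.2 < h) :
    ∀ (m : Nat) (d : PySem.Dict (Nat × Nat) Int) (r : PySem.Set (Nat × Nat))
      (s : List (Nat × Nat)) (res : Int) (P : Finset (Nat × Nat)),
    s.length + 2 * (live.filter (fun p => !(PySem.Set.contains r p))).length ≤ m →
    r.toFinset = P ∪ s.toFinset →
    Disjoint P s.toFinset →
    s.Nodup →
    (∀ p ∈ r, p ∈ live) →
    (∀ n : Nat × Nat, n ∈ live → n ∉ r →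
      d.getD n 0 = (pvDeg w h (live.toFinset \ P) n : Int) ∧
        4 ≤ pvDeg w h (live.toFinset \ P) n) →
    (∀ a ∈ s, pvDeg w h (live.toFinset \ P) a < 4) →
    ∃ σ, pvPeel w h (live.toFinset \ P) σ ∧
      pvStable w h ((live.toFinset \ P) \ σ.toFinset) ∧
      pvGo w h live d r s res = res + σ.length := by
  intro m
  induction m with
  | zero =>
    intro d r s res P hm h1 h2 h3 h4 h5 h6
    have hs : s = [] := by
      cases s with
      | nil => rfl
      | cons a t => simp at hm
    subst hs
    refine ⟨[], trivial, ?_, by rw [pvGo]; simp⟩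
    simpa using pvStable_of_ge w h live r P (by simpa using h1) (fun n hn hnr => (h5 n hn hnr).2)
  | succ m ih =>
    intro d r s res P hm h1 h2 h3 h4 h5 h6
    cases s with
    | nil =>
      refine ⟨[], trivial, ?_, by rw [pvGo]; simp⟩
      simpa using pvStable_of_ge w h live r P (by simpa using h1) (fun n hn hnr => (h5 n hn hnr).2)
    | cons c rest =>
      have hcr : c ∈ r := by
        have hmem : c ∈ r.toFinset := by
          rw [h1]
          exact Finset.mem_union_right _ (by simp)
        exact List.mem_toFinset.mp hmem
      have hcl : c ∈ live := h4 c hcr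
      have hcP : c ∉ P := fun hp => Finset.disjoint_left.mp h2 hp (by simp)
      have h1' : r.toFinset = insert c P ∪ rest.toFinset := by
        rw [h1]
        ext x
        simp only [List.toFinset_cons, Finset.mem_union, Finset.mem_insert]
        tauto
      have h2' : Disjoint (insert c P) rest.toFinset := by
        rw [Finset.disjoint_left]
        intro x hx hmem
        rcases Finset.mem_insert.mp hx with rfl | hx
        · exact (List.nodup_cons.mp h3).1 (List.mem_toFinset.mp hmem)
        · exact Finset.disjoint_left.mp h2 hx (by
            rw [List.toFinset_cons]
            exact Finset.mem_insert_of_mem hmem)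
      have h5' : ∀ n : Nat × Nat, n ∈ live → n ∉ r →
          if n ∈ pvNbrs w h c.1 c.2 then
            d.getD n 0 = (pvDeg w h (live.toFinset \ P) n : Int) ∧
              4 ≤ pvDeg w h (live.toFinset \ P) n
          else
            d.getD n 0 = (pvDeg w h (live.toFinset \ insert c P) n : Int) ∧
              4 ≤ pvDeg w h (live.toFinset \ insert c P) n := by
        intro n hn hnr
        have hold := h5 n hn hnr
        by_cases hnN : n ∈ pvNbrs w h c.1 c.2
        · rw [if_pos hnN]
          exact hold
        · rw [if_neg hnN]
          have hcn : c ∉ pvNbrs w h n.1 n.2 := by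
            intro hmem
            exact hnN ((pvNbrs_symm w h c n (hrect c hcl).1 (hrect c hcl).2
              (hrect n hn).1 (hrect n hn).2).mp hmem)
          have heq : pvDeg w h (live.toFinset \ insert c P) n =
              pvDeg w h (live.toFinset \ P) n := by
            rw [Finset.sdiff_insert]
            exact pvDeg_erase_not w h _ c n hcn
          rw [heq]
          exact hold
      have h6' : ∀ a ∈ rest, pvDeg w h (live.toFinset \ insert c P) a < 4 := by
        intro a ha
        refine lt_of_le_of_lt ?_ (h6 a (List.mem_cons_of_mem _ ha))
        apply pvDeg_mono
        rw [Finset.sdiff_insert]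
        exact Finset.erase_subset _ _
      obtain ⟨hI1, hI2, hI3, hI4, hI5, hI6⟩ :=
        pvFold_inv w h live hrect c hcl P hcP (pvNbrs w h c.1 c.2) d r rest
          (nodup_pvNbrs w h c.1 c.2) (fun _ hm => hm) h1' h2' (List.nodup_cons.mp h3).2
          h4 h5' h6'
      have hmeas : (((pvNbrs w h c.1 c.2).foldl (pvStepF live) (d, r, rest)).2.2).length +
          2 * (live.filter (fun p =>
            !(PySem.Set.contains ((pvNbrs w h c.1 c.2).foldl (pvStepF live)
              (d, r, rest)).2.1 p))).length ≤ m := by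
        have hf := pvFold_meas live (pvNbrs w h c.1 c.2) (d, r, rest)
        dsimp only at hf
        simp only [List.length_cons] at hm
        omega
      obtain ⟨σ', hp', hs', hres'⟩ :=
        ih ((pvNbrs w h c.1 c.2).foldl (pvStepF live) (d, r, rest)).1
          ((pvNbrs w h c.1 c.2).foldl (pvStepF live) (d, r, rest)).2.1
          ((pvNbrs w h c.1 c.2).foldl (pvStepF live) (d, r, rest)).2.2
          (res + 1) (insert c P) hmeas hI1 hI2 hI3 hI4 hI5 hI6
      refine ⟨c :: σ', ?_, ?_, ?_⟩
      · refine ⟨Finset.mem_sdiff.mpr ⟨List.mem_toFinset.mpr hcl, hcP⟩,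
          h6 c List.mem_cons_self, ?_⟩
        rw [show (live.toFinset \ P).erase c = live.toFinset \ insert c P from
          (Finset.sdiff_insert _ _ _).symm]
        exact hp'
      · have hset : (live.toFinset \ P) \ (c :: σ').toFinset =
            (live.toFinset \ insert c P) \ σ'.toFinset := by
          ext x
          simp only [Finset.mem_sdiff, List.toFinset_cons, Finset.mem_insert,
            List.mem_toFinset]
          tauto
        rw [hset]
        exact hs'
      · rw [pvGo]
        rw [hres']
        simp only [List.length_cons]
        push_cast
        ring

-- ===== VERDICT (by name: the statement is the Claim_ definition above) =====
theorem part2_spec : Claim_equal_part2 := by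
  intro raw _ _
  show part2 raw = part2_alt raw
  unfold part2 part2_alt
  dsimp only
  generalize pvLines raw = rows
  set h := rows.length with hh
  set w := (rows.headD []).length with hw
  set live := pvLiveInit rows w h with hlivedef
  set deg := pvDegInit w h live with hdegdef
  set stack := live.filter (fun c => decide (deg.getD c 0 < 4)) with hstackdef
  have hld : live.Nodup := PySem.Set.nodup_ofList _
  have hmem : ∀ p : Nat × Nat, p ∈ live ↔ p.1 < w ∧ p.2 < h ∧ pvCell rows p.1 p.2 = '@' :=
    fun p => mem_pvLiveInit rows w h p
  have hrect : ∀ p ∈ live, p.1 < w ∧ p.2 < h :=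
    fun p hp => ⟨((hmem p).mp hp).1, ((hmem p).mp hp).2.1⟩
  have hA : part2go rows 0 = pvRounds w h live 0 :=
    part2_main (pvAt rows) rows live 0 le_rfl hld hmem
  obtain ⟨σA, hA1, hA2, hA3⟩ := rounds_peel live.length w h live 0 le_rfl hld hrect
  have hdeg0 : ∀ n ∈ live, deg.getD n 0 = (pvDeg w h live.toFinset n : Int) := by
    intro n hn
    rw [hdegdef, pvDegInit_getD w h live n hn, countP_contains_eq_pvDeg w h live hld n]
  have hb1 : (PySem.Set.ofList stack).toFinset =
      (∅ : Finset (Nat × Nat)) ∪ stack.toFinset := by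
    ext x
    simp [PySem.Set.mem_ofList]
  have hb2 : Disjoint (∅ : Finset (Nat × Nat)) stack.toFinset := by simp
  have hb3 : stack.Nodup := hld.filter _
  have hb4 : ∀ p ∈ PySem.Set.ofList stack, p ∈ live := by
    intro p hp
    rw [PySem.Set.mem_ofList] at hp
    exact (List.mem_filter.mp hp).1
  have hb5 : ∀ n : Nat × Nat, n ∈ live → n ∉ PySem.Set.ofList stack →
      deg.getD n 0 = (pvDeg w h (live.toFinset \ ∅) n : Int) ∧
        4 ≤ pvDeg w h (live.toFinset \ ∅) n := by
    intro n hn hnr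
    rw [Finset.sdiff_empty]
    have hns : n ∉ stack := fun hmemb => hnr ((PySem.Set.mem_ofList _ _).mpr hmemb)
    have hge : ¬ (deg.getD n 0 < 4) := by
      intro hdlt
      exact hns (List.mem_filter.mpr ⟨hn, by simpa using hdlt⟩)
    rw [hdeg0 n hn] at hge ⊢
    exact ⟨rfl, by omega⟩
  have hb6 : ∀ a ∈ stack, pvDeg w h (live.toFinset \ ∅) a < 4 := by
    intro a ha
    rw [Finset.sdiff_empty]
    have hlt : deg.getD a 0 < 4 := by simpa using (List.mem_filter.mp ha).2
    rw [hdeg0 a (List.mem_filter.mp ha).1] at hlt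
    exact_mod_cast hlt
  obtain ⟨σB, hB1, hB2, hB3⟩ := go_peel w h live hld hrect
    (stack.length + 2 * (live.filter (fun p =>
      !(PySem.Set.contains (PySem.Set.ofList stack) p))).length)
    deg (PySem.Set.ofList stack) stack 0 ∅ le_rfl hb1 hb2 hb3 hb4 hb5 hb6
  rw [Finset.sdiff_empty] at hB1 hB2
  have hlen : σA.length = σB.length :=
    pvPeel_length_unique w h live.toFinset σA σB hA1 hA2 hB1 hB2
  rw [hA, hA3, hB3, hlen]
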